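-- pv_equiv track=rewrite | github.com/juliomarcopineda/jpl-academic-divisions | prepare_author_manual_curation.py | get_last_name_to_ids
-- ===== SOURCE A (Python) =====
-- def get_last_name_to_ids(entries):
--     last_name_to_ids = {}
--     for entry in entries:
--         _id = entry["_id"]
--         full_name = entry["name"]
--         last_name = full_name.split(",")[0]
--
--         ids = last_name_to_ids.get(last_name, [])
--         ids.append(_id)
--         last_name_to_ids[last_name] = ids
--
--     return last_name_to_ids
-- ===== SOURCE B (Python) =====
-- def get_last_name_to_ids(entries):
--     # sort-free grouped pass: first collect last names in order of first
--     # appearance, then build each group's id list by one filtering scan.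
--     keys = []
--     for entry in entries:
--         last = entry["name"].split(",")[0]
--         if last not in keys:
--             keys.append(last)
--     return {
--         last: [e["_id"] for e in entries if e["name"].split(",")[0] == last]
--         for last in keys
--     }
-- ===== Notes on version B (the rewrite author's own statement) =====
-- stated objective: alternative
-- what changed: B replaces A's single-pass dict accumulation (append to a growing list per key) with a two-phase strategy: dedup the last names in first-appearance order, then build each group's id list by a filtering comprehension over the whole input.
import Mathlib
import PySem

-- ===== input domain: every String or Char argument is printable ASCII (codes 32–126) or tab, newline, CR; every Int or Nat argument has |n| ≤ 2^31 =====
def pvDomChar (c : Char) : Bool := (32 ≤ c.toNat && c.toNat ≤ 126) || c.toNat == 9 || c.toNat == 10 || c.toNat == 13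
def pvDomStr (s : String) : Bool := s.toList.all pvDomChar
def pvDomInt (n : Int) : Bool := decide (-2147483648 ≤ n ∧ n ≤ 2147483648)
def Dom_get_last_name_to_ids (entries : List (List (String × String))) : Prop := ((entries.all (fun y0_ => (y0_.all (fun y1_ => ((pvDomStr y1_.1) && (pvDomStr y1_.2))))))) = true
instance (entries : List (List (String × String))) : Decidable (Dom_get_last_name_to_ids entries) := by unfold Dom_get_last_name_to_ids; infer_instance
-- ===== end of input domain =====

-- B groups by building the first-appearance list of last names and then one filtering scan per name,
-- instead of A's dict-accumulation pass; equal output on entries that carry "_id" and "name" keys (Pre_).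


-- ===== PORT A =====
-- A: one pass, accumulating ids per last name in a dict (new keys append, existing keys keep position).
def get_last_name_to_ids (entries : List (List (String × String))) : List (String × List String) :=
  (entries.foldl (fun (d : PySem.Dict String (List String)) entry =>
      match (PySem.Dict.mk entry).get? "_id", (PySem.Dict.mk entry).get? "name" with
      | some i, some n =>
          let last := ((PySem.Str.split? n ",").getD []).headD ""
          let ids := d.getD last []
          d.insert last (ids ++ [i])
      | _, _ => d  -- KeyError in Python; excluded by Pre_
      ) PySem.Dict.empty).items

-- ===== PORT B =====
-- e["name"].split(",")[0]; the getD/headD defaults are unreachable (Pre_ guarantees the key, sep ≠ "")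
def pvAltKey (entry : List (String × String)) : String :=
  ((PySem.Str.split? (((PySem.Dict.mk entry).get? "name").getD "") ",").getD []).headD ""

def get_last_name_to_ids_alt (entries : List (List (String × String))) : List (String × List String) :=
  let keys := entries.foldl (fun (ks : List String) entry =>
      let last := pvAltKey entry
      if ks.contains last then ks else ks ++ [last]) []
  keys.map (fun last =>
    (last, (entries.filter (fun e => pvAltKey e == last)).map
             (fun e => ((PySem.Dict.mk e).get? "_id").getD "")))

-- ===== PRECONDITION & SPEC =====
-- Pre_ excludes exactly the entries on which Python's entry["_id"] / entry["name"] raises KeyError.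
def Pre_get_last_name_to_ids (entries : List (List (String × String))) : Prop :=
  ∀ e ∈ entries, ((PySem.Dict.mk e).get? "_id").isSome ∧ ((PySem.Dict.mk e).get? "name").isSome
instance (entries : List (List (String × String))) : Decidable (Pre_get_last_name_to_ids entries) := by unfold Pre_get_last_name_to_ids; infer_instance

def pvWitness_get_last_name_to_ids : (List (List (String × String))) :=
  [[("_id", "1"), ("name", "Doe, John")], [("_id", "2"), ("name", "Doe, Jane")]]

def Spec_get_last_name_to_ids (entries : List (List (String × String))) (out : List (String × List String)) : Prop := out = get_last_name_to_ids_alt entries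
instance (entries : List (List (String × String))) (out : List (String × List String)) : Decidable (Spec_get_last_name_to_ids entries out) := by unfold Spec_get_last_name_to_ids; infer_instance

-- ===== CLAIM (what is proved, stated in full; the proofs are below) =====
def Claim_equal_get_last_name_to_ids : Prop := ∀ (entries : List (List (String × String))), Dom_get_last_name_to_ids entries → Pre_get_last_name_to_ids entries → Spec_get_last_name_to_ids entries (get_last_name_to_ids entries)

-- ===== LEMMAS AND PROOFS =====
-- entry["_id"] as B reads it
def pvIdOf (e : List (String × String)) : String := ((PySem.Dict.mk e).get? "_id").getD ""

-- Under Pre_, A's loop body is a 'modify (pvAltKey e) [] (· ++ [pvIdOf e])' step.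
theorem a_fold_eq_modify (entries : List (List (String × String)))
    (h : Pre_get_last_name_to_ids entries) :
    get_last_name_to_ids entries =
      ((entries.map (fun e => (pvAltKey e, pvIdOf e))).foldl
        (fun (d : PySem.Dict String (List String)) p => d.modify p.1 [] (· ++ [p.2]))
        PySem.Dict.empty).items := by
  unfold get_last_name_to_ids
  rw [List.foldl_map]
  congr 1
  apply PySem.List.foldl_congr_mem
  intro acc e he
  obtain ⟨hid, hname⟩ := h e he
  obtain ⟨i, hi⟩ := Option.isSome_iff_exists.mp hid
  obtain ⟨n, hn⟩ := Option.isSome_iff_exists.mp hname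
  simp [hi, hn, pvAltKey, pvIdOf]
  rfl

-- ===== VERDICT (by name: the statement is the Claim_ definition above) =====

theorem get_last_name_to_ids_spec : Claim_equal_get_last_name_to_ids := by
  intro entries _ hpre
  unfold Spec_get_last_name_to_ids
  rw [a_fold_eq_modify entries hpre]
  unfold get_last_name_to_ids_alt
  -- the key list of B is the dedup of the mapped keys
  rw [show
      (entries.foldl (fun (ks : List String) e =>
        let last := pvAltKey e
        if ks.contains last then ks else ks ++ [last]) []) =
      PySem.Set.update ([] : PySem.Set String) (entries.map pvAltKey)
    from (PySem.Set.update_map_eq_foldl_add entries pvAltKey []).symm]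
  have hnd : ((entries.map (fun e => (pvAltKey e, pvIdOf e))).foldl
        (fun (d : PySem.Dict String (List String)) p => d.modify p.1 [] (· ++ [p.2]))
        PySem.Dict.empty).keys.Nodup := by
    rw [List.foldl_map]
    exact PySem.Dict.nodup_keys_foldl_modify_key entries pvAltKey []
      (fun d e v => v ++ [pvIdOf e]) PySem.Dict.empty (by simp)
  rw [PySem.Dict.items_eq_map_keys _ hnd []]
  have hkeys : ((entries.map (fun e => (pvAltKey e, pvIdOf e))).foldl
        (fun (d : PySem.Dict String (List String)) p => d.modify p.1 [] (· ++ [p.2]))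
        PySem.Dict.empty).keys = PySem.Set.update ([] : PySem.Set String) (entries.map pvAltKey) := by
    rw [List.foldl_map]
    have := PySem.Dict.keys_foldl_modify_key entries pvAltKey []
      (fun d e v => v ++ [pvIdOf e]) (PySem.Dict.empty (κ := String) (ν := List String))
    simpa using this
  rw [hkeys]
  apply List.map_congr_left
  intro last _
  rw [PySem.Dict.getD_foldl_modify_append]
  simp [List.filter_map, Function.comp_def, pvIdOf]
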